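-- pv_equiv track=rewrite | github.com/daniel-reich/ubiquitous-fiesta | LM5d2b6YG5vXuYiME_19.py | can_enter_cave
-- ===== SOURCE A (Python) =====
-- def can_enter_cave(x):
--     def common_data(list1, list2):
--         result = False
--         for x in list1:
--             for y in list2:
--                 if x == y:
--                     result = True
--         return result
--     def transpose(m): #Swaps rows and columns. Columns are MUCH easier for this.
--         return[[m[j][i] for j in range(len(m))] for i in range(len(m[0]))]
--     x = transpose(x)
--     zeros = []
--     for k in x:
--         zeros.append([i for i, j in enumerate(k) if j == 0])
--     for z in range(1,len(zeros)):
--             if False in [common_data(zeros[z-1],zeros[z])]: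
--                 return False
--     return True
-- ===== SOURCE B (Python) =====
-- def can_enter_cave(x):
--     ncols = len(x[0])
--     return all(
--         any(r[c] == 0 and r[c + 1] == 0 for r in x)
--         for c in range(ncols - 1)
--     )
-- ===== Notes on version B (the rewrite author's own statement) =====
-- stated objective: faster
-- what changed: B drops A's transpose, per-column zero-index lists and quadratic common_data scan, and directly tests each adjacent column pair with any(r[c]==0 and r[c+1]==0 for r in x); Pre_ excludes exactly the inputs where A raises IndexError (empty matrix, or some row shorter than the first row).
import Mathlib
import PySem

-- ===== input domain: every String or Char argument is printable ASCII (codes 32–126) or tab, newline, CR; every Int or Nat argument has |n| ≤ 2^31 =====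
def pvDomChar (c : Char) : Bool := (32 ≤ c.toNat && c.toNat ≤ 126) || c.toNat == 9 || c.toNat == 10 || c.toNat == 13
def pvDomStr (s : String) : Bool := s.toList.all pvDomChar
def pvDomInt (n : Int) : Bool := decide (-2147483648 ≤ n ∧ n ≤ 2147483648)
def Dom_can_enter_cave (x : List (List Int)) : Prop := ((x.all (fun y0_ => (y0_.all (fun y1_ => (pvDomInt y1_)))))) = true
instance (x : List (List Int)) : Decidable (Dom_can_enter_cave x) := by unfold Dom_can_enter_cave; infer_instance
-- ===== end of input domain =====

-- B drops A's transpose / zero-index lists / quadratic common_data and tests each adjacent column pair directly over the rows (simpler).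

-- ===== PORT A =====
-- inner helper common_data: nested loops setting a flag
def pvCommonData (list1 list2 : List Int) : Bool :=
  list1.foldl (fun res a => list2.foldl (fun r b => if a == b then true else r) res) false

-- transpose(m) = [[m[j][i] for j in range(len(m))] for i in range(len(m[0]))]
def pvTranspose (m : List (List Int)) : List (List Int) :=
  (PySem.List.pyRange 0 ((PySem.List.pyGetD m 0 []).length : Int) 1).map (fun i =>
    (PySem.List.pyRange 0 (m.length : Int) 1).map (fun j =>
      PySem.List.pyGetD (PySem.List.pyGetD m j []) i 0))

-- for z in range(1, len(zeros)): if False in [common_data(zeros[z-1], zeros[z])]: return False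
def pvALoop (zeros : List (List Int)) : List Int → Bool
  | [] => true
  | z :: rest =>
      if pvCommonData (PySem.List.pyGetD zeros (z - 1) []) (PySem.List.pyGetD zeros z []) = false
      then false
      else pvALoop zeros rest

-- zeros = [[i for i, j in enumerate(k) if j == 0] for k in x]  (x the transposed matrix)
def pvZeros (x : List (List Int)) : List (List Int) :=
  (pvTranspose x).map (fun k =>
    ((PySem.List.enumerate k 0).filter (fun p => p.2 == 0)).map (fun p => p.1))

def can_enter_cave (x : List (List Int)) : Bool :=
  pvALoop (pvZeros x) (PySem.List.pyRange 1 ((pvZeros x).length : Int) 1)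

-- ===== PORT B =====
def can_enter_cave_alt (x : List (List Int)) : Bool :=
  (PySem.List.pyRange 0 (((PySem.List.pyGetD x 0 []).length : Int) - 1) 1).all (fun c =>
    x.any (fun r => PySem.List.pyGetD r c 0 == 0 && PySem.List.pyGetD r (c + 1) 0 == 0))

-- ===== PRECONDITION & SPEC =====
-- Pre_ excludes exactly the inputs on which A raises IndexError: the empty matrix
-- (transpose reads x[0]) and matrices with a row shorter than the first row (m[j][i] out of range).
def Pre_can_enter_cave (x : List (List Int)) : Prop :=
  x ≠ [] ∧ ∀ r ∈ x, (x.headD []).length ≤ r.length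
instance (x : List (List Int)) : Decidable (Pre_can_enter_cave x) := by
  unfold Pre_can_enter_cave; infer_instance

def pvWitness_can_enter_cave : List (List Int) := [[0, 0, 2], [1, 0, 0]]

def Spec_can_enter_cave (x : List (List Int)) (out : Bool) : Prop := out = can_enter_cave_alt x
instance (x : List (List Int)) (out : Bool) : Decidable (Spec_can_enter_cave x out) := by
  unfold Spec_can_enter_cave; infer_instance

-- ===== CLAIM (what is proved, stated in full; the proofs are below) =====
def Claim_equal_can_enter_cave : Prop := ∀ (x : List (List Int)), Dom_can_enter_cave x → Pre_can_enter_cave x → Spec_can_enter_cave x (can_enter_cave x)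

-- ===== LEMMAS AND PROOFS =====

-- the column-i list the transpose builds
def pvCol (x : List (List Int)) (i : Int) : List Int :=
  (PySem.List.pyRange 0 (x.length : Int) 1).map (fun j =>
    PySem.List.pyGetD (PySem.List.pyGetD x j []) i 0)

-- the zero-index list A builds for one column
def pvZl (k : List Int) : List Int :=
  ((PySem.List.enumerate k 0).filter (fun p => p.2 == 0)).map (fun p => p.1)

-- "some row j has zeros in columns a and b"
def pvP (x : List (List Int)) (a b : Int) : Prop :=
  ∃ j : Nat, j < x.length ∧ PySem.List.pyGetD (PySem.List.pyGetD x (j : Int) []) a 0 = 0 ∧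
    PySem.List.pyGetD (PySem.List.pyGetD x (j : Int) []) b 0 = 0

theorem pvInner (l2 : List Int) (a : Int) (r : Bool) :
    l2.foldl (fun r b => if a == b then true else r) r = (r || l2.contains a) := by
  induction l2 generalizing r with
  | nil => simp
  | cons b t ih =>
      simp only [List.foldl_cons, ih, List.contains_cons]
      by_cases h : a = b
      · subst h; simp
      · have hb : (a == b) = false := by simp [h]
        simp [hb]

theorem pvOuter (l1 l2 : List Int) (r : Bool) :
    l1.foldl (fun res a => l2.foldl (fun r b => if a == b then true else r) res) r
      = (r || l1.any (fun a => l2.contains a)) := by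
  induction l1 generalizing r with
  | nil => simp
  | cons a t ih =>
      rw [List.foldl_cons, pvInner, ih]
      simp [Bool.or_assoc]

theorem pvCommon_iff (l1 l2 : List Int) :
    pvCommonData l1 l2 = true ↔ ∃ v, v ∈ l1 ∧ v ∈ l2 := by
  unfold pvCommonData
  rw [pvOuter]
  simp

theorem pvZl_mem (k : List Int) (v : Int) :
    v ∈ pvZl k ↔ ∃ j : Nat, j < k.length ∧ v = (j : Int) ∧ k[j]! = 0 := by
  unfold pvZl
  simp only [List.mem_map, List.mem_filter, PySem.List.mem_enumerate_iff]
  constructor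
  · rintro ⟨p, ⟨⟨j, hj, rfl⟩, h0⟩, rfl⟩
    refine ⟨j, hj, by simp, ?_⟩
    simpa [getElem!_pos, hj] using (beq_iff_eq.mp h0)
  · rintro ⟨j, hj, rfl, h0⟩
    exact ⟨((j : Int), k[j]), ⟨⟨j, hj, by simp⟩, by simp [getElem!_pos, hj] at h0; simp [h0]⟩, rfl⟩

theorem pvCol_length (x : List (List Int)) (i : Int) : (pvCol x i).length = x.length := by
  simp [pvCol, PySem.List.length_pyRange_one]

theorem pvCol_get (x : List (List Int)) (i : Int) (j : Nat) (hj : j < x.length) :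
    (pvCol x i)[j]! = PySem.List.pyGetD (PySem.List.pyGetD x (j : Int) []) i 0 := by
  have hl : j < (pvCol x i).length := by rw [pvCol_length]; exact hj
  rw [getElem!_pos _ j hl]
  simp [pvCol, PySem.List.getElem_pyRange_one]

theorem pvCommon_col (x : List (List Int)) (a b : Int) :
    pvCommonData (pvZl (pvCol x a)) (pvZl (pvCol x b)) = true ↔ pvP x a b := by
  rw [pvCommon_iff]
  constructor
  · rintro ⟨v, h1, h2⟩
    rw [pvZl_mem] at h1 h2
    obtain ⟨j1, hj1, rfl, hz1⟩ := h1
    obtain ⟨j2, hj2, hv, hz2⟩ := h2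
    have hjj : j1 = j2 := by exact_mod_cast hv
    subst hjj
    rw [pvCol_length] at hj1
    rw [pvCol_get _ _ _ (by rwa [pvCol_length] at hj2)] at hz1 hz2
    exact ⟨j1, hj1, hz1, hz2⟩
  · rintro ⟨j, hj, h1, h2⟩
    refine ⟨(j : Int), ?_, ?_⟩ <;> rw [pvZl_mem]
    · exact ⟨j, by rwa [pvCol_length], rfl, by rwa [pvCol_get _ _ _ hj]⟩
    · exact ⟨j, by rwa [pvCol_length], rfl, by rwa [pvCol_get _ _ _ hj]⟩

theorem pvAny_iff (x : List (List Int)) (c : Int) :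
    (x.any (fun r => PySem.List.pyGetD r c 0 == 0 && PySem.List.pyGetD r (c + 1) 0 == 0) = true)
      ↔ pvP x c (c + 1) := by
  simp only [List.any_eq_true, Bool.and_eq_true, beq_iff_eq]
  constructor
  · rintro ⟨r, hr, h1, h2⟩
    obtain ⟨j, hj, rfl⟩ := List.mem_iff_getElem.mp hr
    have hx : PySem.List.pyGetD x ((j : Nat) : Int) [] = x[j] := by
      simp [PySem.List.pyGetD_natCast, List.getD_eq_getElem?_getD, hj]
    exact ⟨j, hj, by rw [hx]; exact h1, by rw [hx]; exact h2⟩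
  · rintro ⟨j, hj, h1, h2⟩
    have hx : PySem.List.pyGetD x ((j : Nat) : Int) [] = x[j] := by
      simp [PySem.List.pyGetD_natCast, List.getD_eq_getElem?_getD, hj]
    rw [hx] at h1 h2
    exact ⟨x[j], List.mem_iff_getElem.mpr ⟨j, hj, rfl⟩, h1, h2⟩

theorem pvALoop_all (zeros : List (List Int)) (l : List Int) :
    pvALoop zeros l = l.all (fun z =>
      pvCommonData (PySem.List.pyGetD zeros (z - 1) []) (PySem.List.pyGetD zeros z [])) := by
  induction l with
  | nil => rfl
  | cons z rest ih =>
      rw [pvALoop, List.all_cons, ih]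
      rcases Bool.eq_false_or_eq_true
        (pvCommonData (PySem.List.pyGetD zeros (z - 1) []) (PySem.List.pyGetD zeros z [])) with h | h <;>
        simp [h]

-- ===== VERDICT (by name: the statement is the Claim_ definition above) =====
theorem can_enter_cave_spec : Claim_equal_can_enter_cave := by
  intro x _ _
  unfold Spec_can_enter_cave can_enter_cave can_enter_cave_alt
  set n : Nat := (PySem.List.pyGetD x 0 []).length with hn
  have hT : pvTranspose x = (PySem.List.pyRange 0 (n : Int) 1).map (pvCol x) := rfl
  have hz : pvZeros x = (PySem.List.pyRange 0 (n : Int) 1).map (fun i => pvZl (pvCol x i)) := by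
    unfold pvZeros
    rw [hT, List.map_map]; rfl
  rw [hz]
  have hlen : ((PySem.List.pyRange 0 (n : Int) 1).map (fun i => pvZl (pvCol x i))).length = n := by
    simp [PySem.List.length_pyRange_one]
  rw [hlen, pvALoop_all]
  have hget : ∀ i : Int, 0 ≤ i → i < (n : Int) →
      PySem.List.pyGetD ((PySem.List.pyRange 0 (n : Int) 1).map (fun i => pvZl (pvCol x i))) i []
        = pvZl (pvCol x i) := fun i h1 h2 =>
    PySem.List.pyGetD_map_pyRange_of_nonneg _ _ _ _ h1 h2
  have key : ((PySem.List.pyRange 1 (n : Int) 1).all (fun z =>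
        pvCommonData
          (PySem.List.pyGetD ((PySem.List.pyRange 0 (n : Int) 1).map (fun i => pvZl (pvCol x i))) (z - 1) [])
          (PySem.List.pyGetD ((PySem.List.pyRange 0 (n : Int) 1).map (fun i => pvZl (pvCol x i))) z [])) = true)
      ↔ ((PySem.List.pyRange 0 ((n : Int) - 1) 1).all (fun c =>
        x.any (fun r => PySem.List.pyGetD r c 0 == 0 && PySem.List.pyGetD r (c + 1) 0 == 0)) = true) := by
    simp only [List.all_eq_true, PySem.List.mem_pyRange_one]
    constructor
    · intro h c hc
      have hz2 := h (c + 1) ⟨by omega, by omega⟩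
      rw [hget _ (by omega) (by omega), hget _ (by omega) (by omega)] at hz2
      simp only [add_sub_cancel_right] at hz2
      exact (pvAny_iff x c).mpr ((pvCommon_col x c (c + 1)).mp hz2)
    · intro h z hzr
      rw [hget _ (by omega) (by omega), hget _ (by omega) (by omega)]
      have hg := h (z - 1) ⟨by omega, by omega⟩
      have hp := (pvAny_iff x (z - 1)).mp hg
      have hzz : z - 1 + 1 = z := by omega
      rw [hzz] at hp
      exact (pvCommon_col x (z - 1) z).mpr hp
  exact Bool.eq_iff_iff.mpr (by exact_mod_cast key)
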